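-- pv_equiv track=rewrite | github.com/vaibhavchavan01/NewPyschoolExercise | addDashes.py | addDashes
-- ===== SOURCE A (Python) =====
-- def addDashes(str1, s, i):
--     if i==len(s)-1:
--         str1+=s[i]
--         return str1
--     else:
--         str1+=s[i]+'-'
--         i+=1
--         return addDashes(str1, s, i)
-- ===== SOURCE B (Python) =====
-- def addDashes(str1, s, i):
--     return str1 + s[i] + ''.join('-' + s[k] for k in range(i + 1, len(s)))
-- ===== Notes on version B (the rewrite author's own statement) =====
-- stated objective: simpler
-- what changed: Replaces A's tail recursion carrying an accumulator and index with a closed form: str1 + s[i] + ''.join('-'+s[k] for k in range(i+1, len(s))) — no recursion, no accumulator.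
import Mathlib
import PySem

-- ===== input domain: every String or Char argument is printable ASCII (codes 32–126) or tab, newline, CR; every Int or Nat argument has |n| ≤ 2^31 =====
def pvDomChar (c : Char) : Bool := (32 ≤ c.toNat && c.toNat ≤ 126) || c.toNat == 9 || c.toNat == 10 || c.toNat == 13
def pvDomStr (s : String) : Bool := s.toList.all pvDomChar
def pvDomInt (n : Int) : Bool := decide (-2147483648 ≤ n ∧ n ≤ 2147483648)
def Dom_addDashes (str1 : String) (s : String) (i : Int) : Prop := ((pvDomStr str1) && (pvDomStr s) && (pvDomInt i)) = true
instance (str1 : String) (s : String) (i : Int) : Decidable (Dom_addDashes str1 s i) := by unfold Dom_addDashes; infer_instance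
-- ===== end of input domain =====

-- B replaces A's tail recursion (accumulator + index) by the closed form str1 + s[i] + ''.join('-'+s[k] for k in range(i+1, len(s))) (objective: simpler).
-- ===== PORT A =====
-- termination: a recursive call happens only when s[i] exists (so i < len s) and i ≠ len s - 1
def addDashes (str1 : String) (s : String) (i : Int) : String :=
  if i = (PySem.Str.len s : Int) - 1 then
    match PySem.Str.pyGet? s i with
    | some c => str1.push c
    | none => str1          -- IndexError in Python; excluded by Pre_
  else
    match h : PySem.Str.pyGet? s i with
    | some c => addDashes ((str1.push c).push '-') s (i + 1)
    | none => str1          -- IndexError in Python; excluded by Pre_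
termination_by ((PySem.Str.len s : Int) - 1 - i).toNat
decreasing_by
  have hin : PySem.Raise.InRange s.toList.length i := by
    by_contra hc
    have hn : PySem.List.pyGet? s.toList i = none := (PySem.List.pyGet?_eq_none_iff s.toList i).mpr hc
    simp only [PySem.Str.pyGet?_eq, PySem.Chars.pyGet?_eq_listPyGet?] at h
    rw [h] at hn
    simp at hn
  have hl : PySem.Str.len s = s.toList.length := by simp
  unfold PySem.Raise.InRange at hin
  omega

-- ===== PORT B =====
-- Source B: return str1 + s[i] + ''.join('-' + s[k] for k in range(i + 1, len(s)))
-- s[i] raising IndexError = the none branch; the generator's own IndexError cannot occur under Pre_, the port skips such k (filterMap).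
def addDashes_alt (str1 : String) (s : String) (i : Int) : String :=
  match PySem.Str.pyGet? s i with
  | none => str1            -- IndexError in Python; excluded by Pre_
  | some c =>
    let parts := (PySem.List.pyRange (i + 1) (PySem.Str.len s : Int) 1).filterMap
                   (fun k => (PySem.Str.pyGet? s k).map (fun d => ['-', d]))
    str1.push c ++ String.ofList (PySem.Chars.join [] parts)

-- ===== PRECONDITION & SPEC =====
-- Pre_: exactly the inputs on which Python A returns: a nonempty s and a (possibly negative, Python-style) in-range start index.
def Pre_addDashes (str1 : String) (s : String) (i : Int) : Prop :=
  1 ≤ (PySem.Str.len s : Int) ∧ -(PySem.Str.len s : Int) ≤ i ∧ i ≤ (PySem.Str.len s : Int) - 1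
instance (str1 : String) (s : String) (i : Int) : Decidable (Pre_addDashes str1 s i) := by unfold Pre_addDashes; infer_instance
def pvWitness_addDashes : String × String × Int := ("x: ", "abc", 0)

def Spec_addDashes (str1 : String) (s : String) (i : Int) (out : String) : Prop := out = addDashes_alt str1 s i
instance (str1 : String) (s : String) (i : Int) (out : String) : Decidable (Spec_addDashes str1 s i out) := by unfold Spec_addDashes; infer_instance

-- ===== CLAIM (what is proved, stated in full; the proofs are below) =====
def Claim_equal_addDashes : Prop := ∀ (str1 : String) (s : String) (i : Int), Dom_addDashes str1 s i → Pre_addDashes str1 s i → Spec_addDashes str1 s i (addDashes str1 s i)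

-- ===== LEMMAS AND PROOFS =====
-- every index in [-len s, len s) is a valid Python index
theorem pyGet_isSome_of_range (s : String) (k : Int)
    (h1 : -(s.toList.length : Int) ≤ k) (h2 : k < (s.toList.length : Int)) :
    ∃ c, PySem.Str.pyGet? s k = some c := by
  have hin : PySem.Raise.InRange s.toList.length k := by
    unfold PySem.Raise.InRange; omega
  have hiff := (PySem.List.pyGet?_eq_none_iff s.toList k)
  simp only [PySem.Str.pyGet?_eq, PySem.Chars.pyGet?_eq_listPyGet?]
  cases hg : PySem.List.pyGet? s.toList k with
  | none => exact absurd (hiff.mp hg) (by simpa using hin)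
  | some c => exact ⟨c, rfl⟩

-- the list of '-'+char pieces B joins, as a function of the start index
def bParts (s : String) (j : Int) : List (List Char) :=
  (PySem.List.pyRange j (PySem.Str.len s : Int) 1).filterMap
    (fun k => (PySem.Str.pyGet? s k).map (fun d => ['-', d]))

theorem bParts_nil (s : String) (j : Int) (h : (s.toList.length : Int) ≤ j) : bParts s j = [] := by
  unfold bParts
  rw [PySem.List.pyRange_one_eq_nil (by simpa using h)]
  simp

theorem bParts_cons (s : String) (j : Int) (d : Char)
    (hj : j < (s.toList.length : Int)) (hd : PySem.Str.pyGet? s j = some d) :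
    bParts s j = ['-', d] :: bParts s (j + 1) := by
  unfold bParts
  rw [PySem.List.pyRange_one_cons (by simpa using hj)]
  simp only [List.filterMap_cons, hd, Option.map_some]

-- ''.join: empty separator just concatenates the pieces
theorem joinNil_cons (p : List Char) (rest : List (List Char)) :
    PySem.Chars.join [] (p :: rest) = p ++ PySem.Chars.join [] rest := by
  cases rest with
  | nil => simp [PySem.Chars.join_singleton, PySem.Chars.join_nil]
  | cons q r => simp [PySem.Chars.join_cons_cons]

-- A's recursion computes str1, the character at i, then the joined '-'+char pieces
theorem addDashes_eq_join (s : String) :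
    ∀ (n : Nat) (i : Int) (str1 : String) (c : Char),
      ((s.toList.length : Int) - 1 - i).toNat = n →
      -(s.toList.length : Int) ≤ i → i ≤ (s.toList.length : Int) - 1 →
      PySem.Str.pyGet? s i = some c →
      addDashes str1 s i = str1.push c ++ String.ofList (PySem.Chars.join [] (bParts s (i + 1))) := by
  intro n
  induction n with
  | zero =>
    intro i str1 c hn h1 h2 hc
    have hi : i = (s.toList.length : Int) - 1 := by omega
    rw [addDashes]
    have hlen : (PySem.Str.len s : Int) = (s.toList.length : Int) := by simp
    rw [if_pos (by omega), hc]
    rw [bParts_nil s (i + 1) (by omega)]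
    apply String.toList_injective
    simp [String.toList_push, PySem.Chars.join_nil]
  | succ m ih =>
    intro i str1 c hn h1 h2 hc
    have hi : i < (s.toList.length : Int) - 1 := by omega
    rw [addDashes]
    have hlen : (PySem.Str.len s : Int) = (s.toList.length : Int) := by simp
    rw [if_neg (by omega)]
    split
    case _ c1 heq =>
      rw [hc] at heq
      injection heq with e
      subst e
      obtain ⟨d, hd⟩ := pyGet_isSome_of_range s (i + 1) (by omega) (by omega)
      rw [ih (i + 1) ((str1.push c).push '-') d (by omega) (by omega) (by omega) hd]
      rw [bParts_cons s (i + 1) d (by omega) hd, joinNil_cons]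
      apply String.toList_injective
      simp [String.toList_push, String.toList_append]
    case _ heq =>
      rw [hc] at heq
      cases heq

-- ===== VERDICT (by name: the statement is the Claim_ definition above) =====
theorem addDashes_spec : Claim_equal_addDashes := by
  intro str1 s i _ hpre
  obtain ⟨h1, h2, h3⟩ := hpre
  have hlen : (PySem.Str.len s : Int) = (s.toList.length : Int) := by simp
  obtain ⟨c, hc⟩ := pyGet_isSome_of_range s i (by omega) (by omega)
  show addDashes str1 s i = addDashes_alt str1 s i
  rw [addDashes_eq_join s ((s.toList.length : Int) - 1 - i).toNat i str1 c rfl (by omega) (by omega) hc]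
  unfold addDashes_alt bParts
  rw [hc]
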